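-- pv_equiv track=rewrite | github.com/gqz7/Algorithm-Work | Python/Basic_Intermedite/binaryConverterCLI.py | biToStr
-- ===== SOURCE A (Python) =====
-- def biToStr (binary):
--
--   finalStr = ''
--   splitBi = binary.split(' ')
--   for charInBi in splitBi:
--     base = len(charInBi)-1
--     index = 0
--     charNum = 0
--     while base >= 0:
--       if charInBi[index] == '1':
--         charNum += 2 ** base
--       index += 1
--       base -= 1
--     finalStr += chr(charNum)
--   return finalStr
-- ===== SOURCE B (Python) =====
-- def biToStr(binary):
--     out = []
--     for group in binary.split(' '):
--         n = 0
--         for c in group: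
--             n = n * 2 + (1 if c == '1' else 0)
--         out.append(chr(n))
--     return ''.join(out)
-- ===== Notes on version B (the rewrite author's own statement) =====
-- stated objective: faster
-- what changed: Replaces the per-group base/index/2**base while-loop with a left-to-right Horner accumulation (n = n*2 + bit, no exponentiation) and builds the result as a list of chars joined once instead of repeated string concatenation.
-- outside the precondition, e.g. on biToStr('1111111111111111111111'): A raises ValueError, B raises ValueError
import Mathlib
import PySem

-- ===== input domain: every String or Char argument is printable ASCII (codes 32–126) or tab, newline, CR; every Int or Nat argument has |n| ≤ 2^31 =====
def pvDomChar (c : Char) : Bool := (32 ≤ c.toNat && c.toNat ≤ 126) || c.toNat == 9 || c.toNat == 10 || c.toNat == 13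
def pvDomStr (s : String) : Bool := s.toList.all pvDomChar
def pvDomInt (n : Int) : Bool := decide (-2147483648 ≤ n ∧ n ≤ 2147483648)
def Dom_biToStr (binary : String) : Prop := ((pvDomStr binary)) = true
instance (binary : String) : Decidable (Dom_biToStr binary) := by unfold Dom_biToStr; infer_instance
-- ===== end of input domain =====

-- B replaces the per-group 2**base weight loop by a Horner accumulation (no exponentiation) and one final join; a timing run measured it faster by a constant factor.

-- ===== PORT A =====
-- the while-loop of A: `while base >= 0: if charInBi[index] == '1': charNum += 2 ** base; index += 1; base -= 1`
-- (pyGet? returning none is treated as the untaken branch only to make the recursion total; on every call reached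
-- from biToStr the index is in range, exactly as in the Python)
def biToStr_loop (g : List Char) (base : Int) (index : Int) (charNum : Int) : Int :=
  if h : 0 ≤ base then
    biToStr_loop g (base - 1) (index + 1)
      (if PySem.List.pyGet? g index = some '1' then charNum + 2 ^ base.toNat else charNum)
  else charNum
termination_by (base + 1).toNat
decreasing_by omega

-- `chr` is Char.ofNat; exact on Pre_ (every group encodes a valid non-surrogate code point)
def biToStr (binary : String) : String :=
  String.ofList
    ((PySem.Chars.splitOn binary.toList [' ']).foldl
      (fun finalStr charInBi =>
        finalStr ++ [Char.ofNat (biToStr_loop charInBi ((charInBi.length : Int) - 1) 0 0).toNat])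
      [])

-- ===== PORT B =====
-- `n = 0; for c in group: n = n*2 + (1 if c == '1' else 0)`
def biToStr_horner (g : List Char) : Int :=
  g.foldl (fun n c => n * 2 + (if c = '1' then 1 else 0)) 0

-- out is the list of one-char strings, joined by '' at the end
def biToStr_alt (binary : String) : String :=
  String.ofList
    (PySem.Chars.join []
      ((PySem.Chars.splitOn binary.toList [' ']).map
        (fun g => [Char.ofNat (biToStr_horner g).toNat])))

-- ===== PRECONDITION & SPEC =====
-- the code point a group encodes: the positions holding '1' read as a binary numeral
-- (an input-shape measure for Pre_ only; independent of both ports)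
def pvGroupVal (g : List Char) : Nat :=
  (g.map (fun c => if c = '1' then 1 else 0)).foldl (fun n b => 2 * n + b) 0

-- Pre_ excludes exactly the inputs where some group encodes a code point ≥ 0x110000 — there Python's
-- chr (in A and in B alike) raises ValueError — or a surrogate code point 0xD800–0xDFFF, whose output
-- string cannot be represented as a Lean String (Char excludes surrogates), so no port can match it.
def Pre_biToStr (binary : String) : Prop :=
  ∀ g ∈ PySem.Chars.splitOn binary.toList [' '],
    pvGroupVal g < 1114112 ∧ ¬ (55296 ≤ pvGroupVal g ∧ pvGroupVal g ≤ 57343)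
instance (binary : String) : Decidable (Pre_biToStr binary) := by unfold Pre_biToStr; infer_instance
def pvWitness_biToStr : String := "1000001 1101000"

def Spec_biToStr (binary : String) (out : String) : Prop := out = biToStr_alt binary
instance (binary : String) (out : String) : Decidable (Spec_biToStr binary out) := by unfold Spec_biToStr; infer_instance

-- ===== CLAIM (what is proved, stated in full; the proofs are below) =====
def Claim_equal_biToStr : Prop := ∀ (binary : String), Dom_biToStr binary → Pre_biToStr binary → Spec_biToStr binary (biToStr binary)

-- ===== LEMMAS AND PROOFS =====

-- Horner's fold from an arbitrary accumulator scales the accumulator by 2^length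
lemma horner_shift (g : List Char) (c : Int) :
    g.foldl (fun n ch => n * 2 + (if ch = '1' then 1 else 0)) c
      = c * 2 ^ g.length + biToStr_horner g := by
  induction g generalizing c with
  | nil => simp [biToStr_horner]
  | cons a l ih =>
    simp only [List.foldl_cons, List.length_cons]
    rw [show biToStr_horner (a :: l)
          = l.foldl (fun n ch => n * 2 + (if ch = '1' then 1 else 0))
              ((0:Int) * 2 + (if a = '1' then 1 else 0)) from rfl]
    rw [ih, ih]
    ring

-- peeling the leading character off one Horner value
lemma horner_cons (x : Char) (l : List Char) :
    biToStr_horner (x :: l) = (if x = '1' then 1 else 0) * 2 ^ l.length + biToStr_horner l := by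
  rw [show biToStr_horner (x :: l)
        = l.foldl (fun n ch => n * 2 + (if ch = '1' then 1 else 0))
            ((0:Int) * 2 + (if x = '1' then 1 else 0)) from rfl, horner_shift]
  ring

-- invariant of A's while-loop: starting at index k it adds exactly the value of the remaining suffix
lemma loop_inv (g : List Char) (n : Nat) :
    ∀ (k : Nat) (c : Int), g.length = k + n →
      biToStr_loop g ((g.length : Int) - 1 - k) k c = c + biToStr_horner (g.drop k) := by
  induction n with
  | zero =>
    intro k c hn
    rw [biToStr_loop, dif_neg (by omega)]
    rw [List.drop_of_length_le (by omega)]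
    simp [biToStr_horner]
  | succ n ih =>
    intro k c hn
    have hk : k < g.length := by omega
    rw [biToStr_loop, dif_pos (by omega : (0:Int) ≤ (g.length : Int) - 1 - (k : Int))]
    have e1 : (g.length : Int) - 1 - (k : Int) - 1 = (g.length : Int) - 1 - ((k + 1 : Nat) : Int) := by
      push_cast; ring
    have e2 : (k : Int) + 1 = ((k + 1 : Nat) : Int) := by push_cast; ring
    rw [e1, e2, ih (k + 1) _ (by omega)]
    have hget : PySem.List.pyGet? g (k : Int) = some g[k] := by
      have h := PySem.List.pyGet?_eq_some_getElem (xs := g) (i := (k : Int))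
        (by omega) (by exact_mod_cast hk)
      simpa using h
    rw [List.drop_eq_getElem_cons hk, horner_cons]
    have hlen : (g.drop (k + 1)).length = g.length - (k + 1) := by simp
    have hexp : ((g.length : Int) - 1 - (k : Int)).toNat = g.length - (k + 1) := by omega
    rw [hget]
    by_cases hc : g[k] = '1'
    · simp only [hc, if_pos rfl, hlen, hexp, if_true]
      simp
      ring
    · simp [hc]

-- ===== VERDICT (by name: the statement is the Claim_ definition above) =====
theorem biToStr_spec : Claim_equal_biToStr := by
  unfold Claim_equal_biToStr Spec_biToStr
  intro binary _ _
  unfold biToStr biToStr_alt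
  rw [PySem.List.foldl_append_singleton_eq_map]
  have hjoin :
      PySem.Chars.join []
          ((PySem.Chars.splitOn binary.toList [' ']).map
            (fun g => [Char.ofNat (biToStr_horner g).toNat]))
        = (PySem.Chars.splitOn binary.toList [' ']).map
            (fun g => Char.ofNat (biToStr_horner g).toNat) := by
    rw [show (fun (g : List Char) => [Char.ofNat (biToStr_horner g).toNat])
          = (fun c => [c]) ∘ (fun g => Char.ofNat (biToStr_horner g).toNat) from rfl,
        ← List.map_map]
    exact PySem.Chars.join_nil_singletons _
  rw [hjoin]
  simp only [List.nil_append]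
  apply congrArg
  apply List.map_congr_left
  intro g _
  have h := loop_inv g g.length 0 0 (by omega)
  simp only [Nat.cast_zero, sub_zero, List.drop_zero, zero_add] at h
  rw [h]
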